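-- pv_equiv track=rewrite | github.com/IanLampic/FP---12.-naloga | Intransitive-dice.py | intransitive
-- ===== SOURCE A (Python) =====
-- def comparison(sez1, sez2):
--     count = 0
--     p = []
--     sez1.sort()
--     sez2.sort()
--     for i in range(len(sez1)):
--         for j in range(len(sez2)):
--             if sez1[i] > sez2[j]:
--                 count += 1
--         p.append(count)
--         count = 0
--     return p
--
-- def intransitive(dice):
--     numb_of_dice = len(dice)
--     lst_of_probs = []
--     for i in range(numb_of_dice - 1):
--         comparison(dice[i], dice[i+1])
--         lst_of_probs.append((sorted(dice[i]), sorted(dice[i + 1]), sum(comparison(dice[i], dice[i+1]))))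
--     lst_of_probs.append((sorted(dice[numb_of_dice-1]), sorted(dice[0]), sum(comparison(dice[numb_of_dice-1], dice[0]))))
--     prob = 100 #določena zgornja meja za minimum, ki ne bo presežena
--     for i in range(len(lst_of_probs)):
--         prob = min(prob, lst_of_probs[i][2])
--     return prob, dice
-- ===== SOURCE B (Python) =====
-- def intransitive(dice):
--     # Sort every die once, in place (A sorts them in place too via comparison()).
--     for d in dice:
--         d.sort()
--
--     def beats(a, b):
--         # a, b sorted ascending: count pairs (x, y), x in a, y in b, with x > y
--         # by a linear merge: j is the number of elements of b below the current x.
--         total = 0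
--         j = 0
--         for x in a:
--             while j < len(b) and b[j] < x:
--                 j += 1
--             total += j
--         return total
--
--     n = len(dice)
--     prob = 100  # same upper bound for the minimum as the original
--     for i in range(n):
--         prob = min(prob, beats(dice[i], dice[(i + 1) % n]))
--     return prob, dice
-- ===== Notes on version B (the rewrite author's own statement) =====
-- stated objective: faster
-- what changed: B sorts each die once up front and computes each cyclic pair's beat count with a linear two-pointer merge over the two sorted dice, instead of A's re-sorting both dice of every pair twice and counting with a nested quadratic scan.
import Mathlib
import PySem

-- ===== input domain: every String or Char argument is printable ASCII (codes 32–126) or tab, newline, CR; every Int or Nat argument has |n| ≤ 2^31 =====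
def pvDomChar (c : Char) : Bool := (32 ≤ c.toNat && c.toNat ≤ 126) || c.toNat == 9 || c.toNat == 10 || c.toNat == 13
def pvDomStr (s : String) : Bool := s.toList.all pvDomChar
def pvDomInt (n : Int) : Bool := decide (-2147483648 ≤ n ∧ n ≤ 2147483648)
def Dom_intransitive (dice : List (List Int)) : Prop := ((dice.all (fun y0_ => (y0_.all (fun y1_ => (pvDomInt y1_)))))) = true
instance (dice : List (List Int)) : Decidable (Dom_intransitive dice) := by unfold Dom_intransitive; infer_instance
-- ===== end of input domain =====

-- B sorts each die once and counts beats by a linear two-pointer merge instead of A's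
-- re-sorting per pair with a nested quadratic count; both A and B sort the dice sublists
-- in place in Python (the equivalence proved here is about the return value).


-- ===== PORT A =====
def pySortInt (xs : List Int) : List Int := PySem.List.sorted xs (fun x => x)

-- comparison(sez1, sez2): sorts both args in place, returns the per-element beat counts.
-- Mutation is modelled by returning the sorted lists alongside p; callers thread them.
def comparisonA (sez1 sez2 : List Int) : List Int × List Int × List Int :=
  let s1 := pySortInt sez1
  let s2 := pySortInt sez2
  let p := (PySem.List.pyRange 0 (PySem.List.len s1)).foldl
    (fun acc i =>
      let count : Int := (PySem.List.pyRange 0 (PySem.List.len s2)).foldl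
        (fun c j => if PySem.List.pyGetD s1 i 0 > PySem.List.pyGetD s2 j 0 then c + 1 else c) 0
      acc ++ [count]) []
  (s1, s2, p)

-- one iteration of A's main loop (the two comparison() calls mutate dice[i], dice[i+1])
def intransitiveStep (st : List (List Int) × List (List Int × List Int × Int)) (i : Int) :
    List (List Int) × List (List Int × List Int × Int) :=
  let d := st.1
  let c1 := comparisonA (PySem.List.pyGetD d i []) (PySem.List.pyGetD d (i+1) [])
  let d1 := PySem.List.pySetD (PySem.List.pySetD d i c1.1) (i+1) c1.2.1
  let t1 := pySortInt (PySem.List.pyGetD d1 i [])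
  let t2 := pySortInt (PySem.List.pyGetD d1 (i+1) [])
  let c2 := comparisonA (PySem.List.pyGetD d1 i []) (PySem.List.pyGetD d1 (i+1) [])
  let d2 := PySem.List.pySetD (PySem.List.pySetD d1 i c2.1) (i+1) c2.2.1
  (d2, st.2 ++ [(t1, t2, c2.2.2.sum)])

def intransitive (dice : List (List Int)) : Int × List (List Int) :=
  let n := PySem.List.len dice
  let st := (PySem.List.pyRange 0 (n-1)).foldl intransitiveStep (dice, [])
  let d := st.1
  let tL1 := pySortInt (PySem.List.pyGetD d (n-1) [])
  let tL2 := pySortInt (PySem.List.pyGetD d 0 [])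
  let cL := comparisonA (PySem.List.pyGetD d (n-1) []) (PySem.List.pyGetD d 0 [])
  let d' := PySem.List.pySetD (PySem.List.pySetD d (n-1) cL.1) 0 cL.2.1
  let probs' := st.2 ++ [(tL1, tL2, cL.2.2.sum)]
  let prob := (PySem.List.pyRange 0 (PySem.List.len probs')).foldl
    (fun pr i => min pr (PySem.List.pyGetD probs' i ([], [], 0)).2.2) 100
  (prob, d')

-- ===== PORT B =====
-- the inner `while j < len(b) and b[j] < x: j += 1` of beats()
def advanceB (b : List Int) (x : Int) (j : Nat) : Nat :=
  if h : j < b.length then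
    if b[j] < x then advanceB b x (j + 1) else j
  else j
termination_by b.length - j

-- the `for x in a` loop of beats(), carrying (j, total)
def beatsGo (b : List Int) : List Int → Nat → Int → Int
  | [], _, total => total
  | x :: rest, j, total =>
    let j' := advanceB b x j
    beatsGo b rest j' (total + (j' : Int))

def intransitive_alt (dice : List (List Int)) : Int × List (List Int) :=
  let d := dice.map pySortInt
  let n := PySem.List.len d
  let prob := (PySem.List.pyRange 0 n).foldl
    (fun pr i => min pr (beatsGo (PySem.List.pyGetD d (PySem.Int.mod (i + 1) n) [])
      (PySem.List.pyGetD d i []) 0 0)) 100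
  (prob, d)

-- ===== PRECONDITION & SPEC =====
-- Pre_ excludes only the empty list of dice, on which A raises IndexError (dice[-1]).
def Pre_intransitive (dice : List (List Int)) : Prop := dice ≠ []
instance (dice : List (List Int)) : Decidable (Pre_intransitive dice) := by
  unfold Pre_intransitive; infer_instance
def pvWitness_intransitive : List (List Int) := [[2, 1], [3, 1]]

def Spec_intransitive (dice : List (List Int)) (out : Int × List (List Int)) : Prop :=
  out = intransitive_alt dice
instance (dice : List (List Int)) (out : Int × List (List Int)) :
    Decidable (Spec_intransitive dice out) := by unfold Spec_intransitive; infer_instance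

-- ===== CLAIM (what is proved, stated in full; the proofs are below) =====
def Claim_equal_intransitive : Prop := ∀ (dice : List (List Int)), Dom_intransitive dice →
  Pre_intransitive dice → Spec_intransitive dice (intransitive dice)

-- ===== LEMMAS AND PROOFS =====

-- notation-light helpers used only by the proofs
def sd (dice : List (List Int)) (k : Nat) : List Int := pySortInt (dice.getD k [])
def cnt (v : List Int) (x : Int) : Nat := v.countP (fun y => decide (y < x))
def pairVal (u v : List Int) : Int := (u.map (fun x => (cnt v x : Int))).sum
def upTo (dice : List (List Int)) (t : Nat) : List (List Int) :=
  (dice.take t).map pySortInt ++ dice.drop t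

theorem pySortInt_pairwise (u : List Int) : (pySortInt u).Pairwise (· ≤ ·) :=
  PySem.List.sorted_pairwise u (fun x => x)

theorem pySortInt_idem (u : List Int) : pySortInt (pySortInt u) = pySortInt u :=
  PySem.List.sorted_eq_self_of_pairwise _ _ (pySortInt_pairwise u)

theorem map_comp_pyGetD {α β : Type} (xs : List α) (d : α) (F : α → β) :
    (PySem.List.pyRange 0 (PySem.List.len xs)).map (fun j => F (PySem.List.pyGetD xs j d)) =
      xs.map F := by
  calc (PySem.List.pyRange 0 (PySem.List.len xs)).map (fun j => F (PySem.List.pyGetD xs j d))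
      = ((PySem.List.pyRange 0 (PySem.List.len xs)).map (fun j => PySem.List.pyGetD xs j d)).map F := by
        rw [List.map_map]; rfl
    _ = xs.map F := by rw [PySem.List.map_pyGetD_pyRange_zero]

-- A's comparison(): components and sum of the returned p
theorem comparisonA_fst (u v : List Int) : (comparisonA u v).1 = pySortInt u := rfl
theorem comparisonA_snd (u v : List Int) : (comparisonA u v).2.1 = pySortInt v := rfl
theorem comparisonA_sum (u v : List Int) :
    (comparisonA u v).2.2.sum = pairVal (pySortInt u) (pySortInt v) := by
  unfold comparisonA
  simp only []
  have inner : ∀ x : Int,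
      (PySem.List.pyRange 0 (PySem.List.len (pySortInt v))).foldl
        (fun c j => if x > PySem.List.pyGetD (pySortInt v) j 0 then c + 1 else c) 0
      = (cnt (pySortInt v) x : Int) := by
    intro x
    rw [PySem.List.foldl_pyRange_zero_pyGetD (pySortInt v) 0
      (fun c y => if x > y then c + 1 else c) 0]
    rw [PySem.List.foldl_ite_add_one (fun y => x > y) (pySortInt v) 0]
    simp [cnt]
  have outer : (PySem.List.pyRange 0 (PySem.List.len (pySortInt u))).foldl
      (fun acc i => acc ++ [(PySem.List.pyRange 0 (PySem.List.len (pySortInt v))).foldl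
        (fun c j => if PySem.List.pyGetD (pySortInt u) i 0 > PySem.List.pyGetD (pySortInt v) j 0
          then c + 1 else c) 0]) ([] : List Int)
      = (pySortInt u).map (fun x => (cnt (pySortInt v) x : Int)) := by
    rw [PySem.List.foldl_append_singleton_eq_map]
    simp only [List.nil_append]
    have := map_comp_pyGetD (pySortInt u) 0
      (fun x => (PySem.List.pyRange 0 (PySem.List.len (pySortInt v))).foldl
        (fun c j => if x > PySem.List.pyGetD (pySortInt v) j 0 then c + 1 else c) (0 : Int))
    exact this.trans (List.map_congr_left (fun x _ => inner x))
  rw [outer]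
  rfl

-- B's while-loop: advanceB lands on the length of the `< x` prefix
theorem takeWhile_getElem_prop {α : Type} (p : α → Bool) (l : List α) (j : Nat)
    (hj : j < (l.takeWhile p).length) (hl : j < l.length) :
    p (l[j]) = true ∧ (l.takeWhile p)[j] = l[j] := by
  induction l generalizing j with
  | nil => simp at hl
  | cons y t ih =>
    by_cases hy : p y
    · simp [hy] at hj ⊢
      cases j with
      | zero => simp [hy]
      | succ k =>
        have := ih k (by omega) (by simp at hl; omega)
        simpa using this
    · simp [hy] at hj

theorem takeWhile_boundary {α : Type} (p : α → Bool) (l : List α)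
    (h : (l.takeWhile p).length < l.length) :
    p (l[(l.takeWhile p).length]) = false := by
  induction l with
  | nil => simp at h
  | cons y t ih =>
    by_cases hy : p y
    · simp [hy] at h ⊢
      exact ih (by omega)
    · simp [hy]

theorem advanceB_eq (b : List Int) (x : Int) (j : Nat)
    (h : j ≤ (b.takeWhile (fun y => decide (y < x))).length) :
    advanceB b x j = (b.takeWhile (fun y => decide (y < x))).length := by
  set tw := (b.takeWhile (fun y => decide (y < x))).length with htw
  have htwlen : tw ≤ b.length := by
    rw [htw]; exact (List.takeWhile_prefix _).length_le
  have key : ∀ k j, b.length - j ≤ k → j ≤ tw → advanceB b x j = tw := by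
    intro k
    induction k with
    | zero =>
      intro j h1 h2
      rw [advanceB]
      have : ¬ j < b.length := by omega
      simp [this]
      omega
    | succ k ih =>
      intro j h1 h2
      rw [advanceB]
      by_cases hlt : j < b.length
      · simp [hlt]
        by_cases hx : b[j] < x
        · simp [hx]
          have hjtw : j < tw := by
            rcases Nat.lt_or_ge j tw with h' | h'
            · exact h'
            · have hj : j = tw := by omega
              have hbd := takeWhile_boundary (fun y => decide (y < x)) b (by omega)
              simp only [← htw, ← hj] at hbd
              simp [hx] at hbd
          exact ih (j+1) (by omega) (by omega)
        · simp [hx]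
          by_cases hjtw : j < tw
          · have := (takeWhile_getElem_prop (fun y => decide (y < x)) b j (by omega) hlt).1
            simp at this
            exact absurd this hx
          · omega
      · simp [hlt]; omega
  exact key (b.length - j) j (le_refl _) h

theorem cnt_eq_takeWhile (v : List Int) (x : Int) (hv : v.Pairwise (· ≤ ·)) :
    cnt v x = (v.takeWhile (fun y => decide (y < x))).length := by
  induction v with
  | nil => simp [cnt]
  | cons y t ih =>
    rw [List.pairwise_cons] at hv
    by_cases hy : y < x
    · simp [cnt, hy] at ih ⊢
      exact ih hv.2
    · simp [cnt, hy]
      intro z hz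
      have := hv.1 z hz
      omega

theorem countP_mono_x (v : List Int) (x x' : Int) (h : x ≤ x') : cnt v x ≤ cnt v x' := by
  apply List.countP_mono_left
  intro z _ hz
  simp at hz ⊢
  omega

theorem beatsGo_eq (b : List Int) (hb : b.Pairwise (· ≤ ·)) :
    ∀ (a : List Int) (j : Nat) (t : Int), a.Pairwise (· ≤ ·) →
      (∀ x ∈ a, j ≤ cnt b x) → beatsGo b a j t = t + pairVal a b := by
  intro a
  induction a with
  | nil => intro j t _ _; simp [beatsGo, pairVal]
  | cons x rest ih =>
    intro j t ha hall
    rw [List.pairwise_cons] at ha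
    have hjx : j ≤ cnt b x := hall x (by simp)
    have hadv : advanceB b x j = cnt b x := by
      rw [cnt_eq_takeWhile b x hb] at hjx ⊢
      exact advanceB_eq b x j hjx
    rw [beatsGo]
    simp only [hadv]
    rw [ih (cnt b x) (t + (cnt b x : Int)) ha.2
      (fun x' hx' => countP_mono_x b x x' (ha.1 x' hx'))]
    simp [pairVal]
    ring

theorem beatsGo_sorted (u v : List Int) :
    beatsGo (pySortInt v) (pySortInt u) 0 0 = pairVal (pySortInt u) (pySortInt v) := by
  rw [beatsGo_eq (pySortInt v) (pySortInt_pairwise v) (pySortInt u) 0 0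
    (pySortInt_pairwise u) (fun x _ => Nat.zero_le _)]
  simp

-- the threaded dice state
theorem upTo_length (dice : List (List Int)) (t : Nat) :
    (upTo dice t).length = dice.length := by
  simp [upTo]; omega

theorem upTo_getElem (dice : List (List Int)) (t k : Nat) (ht : t ≤ dice.length)
    (hk : k < dice.length) :
    (upTo dice t)[k]'(by rw [upTo_length]; exact hk) =
      if k < t then pySortInt (dice[k]) else dice[k] := by
  unfold upTo
  by_cases h : k < t
  · rw [List.getElem_append_left (by simp; omega)]
    simp [h, List.getElem_take]
  · rw [List.getElem_append_right (by simp; omega)]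
    rw [List.getElem_drop]
    simp [h]
    have e : t + (k - min t dice.length) = k := by omega
    simp [e]

theorem sd_eq (dice : List (List Int)) (k : Nat) (hk : k < dice.length) :
    sd dice k = pySortInt (dice[k]) := by
  simp [sd, List.getD_eq_getElem?_getD, List.getElem?_eq_getElem hk]

theorem upTo_getD (dice : List (List Int)) (t k : Nat) (ht : t ≤ dice.length)
    (hk : k < dice.length) :
    PySem.List.pyGetD (upTo dice t) (k : Int) [] =
      if k < t then sd dice k else dice.getD k [] := by
  rw [PySem.List.pyGetD_natCast]
  rw [List.getD_eq_getElem?_getD, List.getElem?_eq_getElem (by rw [upTo_length]; exact hk)]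
  rw [upTo_getElem dice t k ht hk]
  simp only [Option.getD_some]
  by_cases h : k < t <;>
    simp [h, sd_eq dice k hk, List.getD_eq_getElem?_getD, List.getElem?_eq_getElem hk]

theorem upTo_set_lt (dice : List (List Int)) (t k : Nat) (ht : t ≤ dice.length)
    (hk : k < t) : (upTo dice t).set k (sd dice k) = upTo dice t := by
  have hk' : k < dice.length := by omega
  apply List.ext_getElem
  · simp
  intro j hj1 hj2
  rw [List.getElem_set]
  split
  · next h => subst h; rw [upTo_getElem dice t k ht hk']; simp [hk, sd_eq dice k hk']
  · rfl

theorem upTo_set_eq (dice : List (List Int)) (t : Nat) (ht : t < dice.length) :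
    (upTo dice t).set t (sd dice t) = upTo dice (t + 1) := by
  apply List.ext_getElem
  · simp [upTo_length]
  intro j hj1 hj2
  have hj : j < dice.length := by simpa [upTo_length] using hj2
  rw [List.getElem_set]
  rw [upTo_getElem dice (t+1) j (by omega) hj]
  split
  · next h => subst h; simp [sd_eq dice t ht]
  · next h =>
    rw [upTo_getElem dice t j (by omega) hj]
    have : j < t ↔ j < t + 1 := by omega
    simp [this]

theorem upTo_zero (dice : List (List Int)) : upTo dice 0 = dice := by
  simp [upTo]

theorem upTo_full (dice : List (List Int)) : upTo dice dice.length = dice.map pySortInt := by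
  simp [upTo]

-- one loop iteration from a partially-sorted state
theorem step_eq (dice : List (List Int)) (P : List (List Int × List Int × Int)) (i t : Nat)
    (h1 : i + 1 < dice.length) (h2 : i ≤ t) (h3 : t ≤ i + 1) :
    intransitiveStep (upTo dice t, P) (i : Int) =
      (upTo dice (i + 2), P ++ [(sd dice i, sd dice (i + 1),
        pairVal (sd dice i) (sd dice (i + 1)))]) := by
  have hlen : t ≤ dice.length := by omega
  have hi : i < dice.length := by omega
  have hcast : ((i : Nat) : Int) + 1 = ((i + 1 : Nat) : Int) := by push_cast; ring
  have pySort_sd : ∀ k, pySortInt (sd dice k) = sd dice k := fun k => pySortInt_idem _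
  have hset_cast : ∀ (xs : List (List Int)) (v : List Int),
      PySem.List.pySetD xs ((i : Int) + 1) v = xs.set (i + 1) v := by
    intro xs v; rw [hcast, PySem.List.pySetD_natCast]
  have hs1 : pySortInt (PySem.List.pyGetD (upTo dice t) (i : Int) []) = sd dice i := by
    rw [upTo_getD dice t i hlen hi]
    by_cases h : i < t
    · simp [h, pySort_sd]
    · simp [h, sd]
  have hs2 : pySortInt (PySem.List.pyGetD (upTo dice t) ((i : Int) + 1) []) =
      sd dice (i + 1) := by
    rw [hcast, upTo_getD dice t (i + 1) hlen h1]
    simp [show ¬ (i + 1 < t) by omega, sd]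
  have hset1 : (upTo dice t).set i (sd dice i) = upTo dice (i + 1) := by
    rcases (by omega : t = i ∨ t = i + 1) with h | h <;> rw [h]
    · exact upTo_set_eq dice i (by omega)
    · exact upTo_set_lt dice (i + 1) i (by omega) (by omega)
  have hd1 : ((upTo dice t).set i (sd dice i)).set (i + 1) (sd dice (i + 1)) =
      upTo dice (i + 2) := by
    rw [hset1]
    exact upTo_set_eq dice (i + 1) h1
  have hg1 : pySortInt (PySem.List.pyGetD (upTo dice (i + 2)) (i : Int) []) = sd dice i := by
    rw [upTo_getD dice (i + 2) i (by omega) hi]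
    simp [pySort_sd]
  have hg2 : pySortInt (PySem.List.pyGetD (upTo dice (i + 2)) ((i : Int) + 1) []) =
      sd dice (i + 1) := by
    rw [hcast, upTo_getD dice (i + 2) (i + 1) (by omega) h1]
    simp [pySort_sd]
  have hd2 : ((upTo dice (i + 2)).set i (sd dice i)).set (i + 1) (sd dice (i + 1)) =
      upTo dice (i + 2) := by
    rw [upTo_set_lt dice (i + 2) i (by omega) (by omega),
      upTo_set_lt dice (i + 2) (i + 1) (by omega) (by omega)]
  unfold intransitiveStep
  simp only [comparisonA_fst, comparisonA_snd, PySem.List.pySetD_natCast, hset_cast]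
  rw [hs1, hs2]
  rw [hd1]
  rw [comparisonA_sum]
  rw [hg1, hg2]
  rw [hd2]

theorem loop_eq (dice : List (List Int)) (m : Nat) (h1 : 1 ≤ m) (h2 : m ≤ dice.length - 1) :
    ((List.range m).map (fun (k : Nat) => (k : Int))).foldl intransitiveStep (dice, []) =
      (upTo dice (m + 1), (List.range m).map (fun k =>
        (sd dice k, sd dice (k + 1), pairVal (sd dice k) (sd dice (k + 1))))) := by
  induction m, h1 using Nat.le_induction with
  | base =>
    have hlen : 1 < dice.length := by omega
    simp only [List.range_one, List.map_cons, List.map_nil, List.foldl_cons, List.foldl_nil]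
    conv_lhs => rw [show (dice, ([] : List (List Int × List Int × Int))) =
      (upTo dice 0, ([] : List (List Int × List Int × Int))) by rw [upTo_zero]]
    rw [step_eq dice [] 0 0 (by omega) (by omega) (by omega)]
    simp
  | succ m hm ih =>
    have h2' : m ≤ dice.length - 1 := by omega
    rw [List.range_succ, List.map_append, List.foldl_append, ih h2']
    simp only [List.map_cons, List.map_nil, List.foldl_cons, List.foldl_nil]
    rw [step_eq dice _ m (m + 1) (by omega) (by omega) (by omega)]
    simp

def probMin (dice : List (List Int)) : Int :=
  min ((List.range (dice.length - 1)).foldl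
    (fun pr k => min pr (pairVal (sd dice k) (sd dice (k + 1)))) 100)
    (pairVal (sd dice (dice.length - 1)) (sd dice 0))

theorem pySort_sd (dice : List (List Int)) (k : Nat) :
    pySortInt (sd dice k) = sd dice k := pySortInt_idem _

theorem foldl_min_tuples (l : List (List Int × List Int × Int)) :
    ((List.range l.length).map (fun (k : Nat) => (k : Int))).foldl
      (fun pr i => min pr (PySem.List.pyGetD l i ([], [], 0)).2.2) 100
    = l.foldl (fun pr tr => min pr tr.2.2) 100 := by
  rw [← PySem.List.pyRange_zero_nat, ← PySem.List.len_eq]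
  exact PySem.List.foldl_pyRange_zero_pyGetD l ([], [], 0) (fun pr tr => min pr tr.2.2) 100

theorem tuples_foldl (dice : List (List Int)) :
    ((List.range (dice.length - 1)).map (fun k =>
        (sd dice k, sd dice (k + 1), pairVal (sd dice k) (sd dice (k + 1)))) ++
      [(sd dice (dice.length - 1), sd dice 0,
        pairVal (sd dice (dice.length - 1)) (sd dice 0))]).foldl
      (fun pr tr => min pr tr.2.2) 100 = probMin dice := by
  rw [List.foldl_append, List.foldl_map]
  rfl

theorem upTo_getD0 (dice : List (List Int)) (t : Nat) (ht : t ≤ dice.length)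
    (h0 : 0 < dice.length) :
    PySem.List.pyGetD (upTo dice t) (0 : Int) [] =
      if 0 < t then sd dice 0 else dice.getD 0 [] := by
  rw [show (0 : Int) = ((0 : Nat) : Int) by simp]
  exact upTo_getD dice t 0 ht h0

theorem pySetD0 {α : Type} (xs : List α) (v : α) :
    PySem.List.pySetD xs (0 : Int) v = xs.set 0 v := by
  rw [show (0 : Int) = ((0 : Nat) : Int) by simp, PySem.List.pySetD_natCast]

theorem mget (dice : List (List Int)) (k : Nat) (hk : k < dice.length) :
    PySem.List.pyGetD (dice.map pySortInt) (k : Int) [] = sd dice k := by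
  rw [← upTo_full, upTo_getD dice _ k le_rfl hk]
  simp [hk]

theorem A_eq (dice : List (List Int)) (h : dice ≠ []) :
    intransitive dice = (probMin dice, dice.map pySortInt) := by
  have hlen : 1 ≤ dice.length := by
    cases dice with
    | nil => exact absurd rfl h
    | cons a l => simp
  have hn1 : (dice.length : Int) - 1 = ((dice.length - 1 : Nat) : Int) := by
    rw [Nat.cast_sub hlen]; simp
  unfold intransitive
  simp only [PySem.List.len_eq, hn1, PySem.List.pyRange_zero_nat]
  rcases Nat.lt_or_ge 1 dice.length with h2 | h2
  · -- at least two dice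
    rw [loop_eq dice (dice.length - 1) (by omega) le_rfl]
    rw [show dice.length - 1 + 1 = dice.length from by omega]
    simp only []
    rw [upTo_getD dice dice.length (dice.length - 1) le_rfl (by omega)]
    rw [if_pos (by omega : dice.length - 1 < dice.length)]
    rw [upTo_getD0 dice dice.length le_rfl (by omega)]
    rw [if_pos (by omega : 0 < dice.length)]
    rw [comparisonA_fst, comparisonA_snd, comparisonA_sum]
    rw [pySort_sd, pySort_sd]
    rw [PySem.List.pySetD_natCast, pySetD0]
    rw [upTo_set_lt dice dice.length (dice.length - 1) le_rfl (by omega)]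
    rw [upTo_set_lt dice dice.length 0 le_rfl (by omega)]
    rw [upTo_full]
    rw [foldl_min_tuples, tuples_foldl]
  · -- exactly one die
    have hl : dice.length = 1 := by omega
    simp only [hl, Nat.sub_self, List.range_zero, List.map_nil, List.foldl_nil, Nat.cast_zero]
    rw [PySem.List.pyGetD_zero]
    rw [comparisonA_fst, comparisonA_snd, comparisonA_sum]
    rw [pySetD0, pySetD0, List.set_set]
    rw [show pySortInt (dice.getD 0 []) = sd dice 0 from rfl]
    have hset : dice.set 0 (sd dice 0) = dice.map pySortInt := by
      rw [show dice.set 0 (sd dice 0) = (upTo dice 0).set 0 (sd dice 0) from by rw [upTo_zero]]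
      rw [upTo_set_eq dice 0 (by omega)]
      rw [show (0 + 1 : Nat) = dice.length from by omega]
      exact upTo_full dice
    rw [hset]
    rw [foldl_min_tuples]
    simp only [List.nil_append, List.foldl_cons, List.foldl_nil]
    unfold probMin
    rw [hl]
    simp [sd]

theorem B_eq (dice : List (List Int)) (h : dice ≠ []) :
    intransitive_alt dice = (probMin dice, dice.map pySortInt) := by
  have hlen : 1 ≤ dice.length := by
    cases dice with
    | nil => exact absurd rfl h
    | cons a l => simp
  unfold intransitive_alt
  simp only [PySem.List.len_eq, List.length_map, PySem.List.pyRange_zero_nat, List.foldl_map]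
  refine Prod.ext ?_ rfl
  simp only []
  have hsplit : List.range dice.length = List.range (dice.length - 1) ++ [dice.length - 1] := by
    conv_lhs => rw [show dice.length = (dice.length - 1) + 1 from by omega]
    rw [List.range_succ]
  rw [hsplit, List.foldl_append]
  have hcongr : List.foldl (fun (pr : Int) (k : Nat) => min pr (beatsGo
        (PySem.List.pyGetD (dice.map pySortInt) (PySem.Int.mod ((k : Int) + 1) (dice.length : Int)) [])
        (PySem.List.pyGetD (dice.map pySortInt) (k : Int) []) 0 0)) 100 (List.range (dice.length - 1))
      = List.foldl
        (fun pr k => min pr (pairVal (sd dice k) (sd dice (k + 1)))) 100 (List.range (dice.length - 1)) := by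
    refine PySem.List.foldl_congr_mem _ _ _ _ ?_
    intro acc k hk
    rw [List.mem_range] at hk
    have hmod : PySem.Int.mod ((k : Int) + 1) (dice.length : Int) = ((k + 1 : Nat) : Int) := by
      rw [PySem.Int.mod_eq_emod_of_pos (by exact_mod_cast hlen)]
      rw [Int.emod_eq_of_lt (by positivity) (by exact_mod_cast (by omega : k + 1 < dice.length))]
      push_cast; ring
    rw [hmod, mget dice (k + 1) (by omega), mget dice k (by omega)]
    rw [show sd dice (k + 1) = pySortInt (dice.getD (k + 1) []) from rfl,
      show sd dice k = pySortInt (dice.getD k []) from rfl]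
    rw [beatsGo_sorted]
  rw [hcongr]
  simp only [List.foldl_cons, List.foldl_nil]
  have hmodL : PySem.Int.mod (((dice.length - 1 : Nat) : Int) + 1) (dice.length : Int) = 0 := by
    rw [show ((dice.length - 1 : Nat) : Int) + 1 = (dice.length : Int) from by
      rw [Nat.cast_sub hlen]; ring]
    rw [PySem.Int.mod_eq_emod_of_pos (by exact_mod_cast hlen)]
    exact Int.emod_self
  rw [hmodL]
  have mget0 : PySem.List.pyGetD (dice.map pySortInt) (0 : Int) [] = sd dice 0 := by
    rw [show (0 : Int) = ((0 : Nat) : Int) by simp]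
    exact mget dice 0 (by omega)
  rw [mget0, mget dice (dice.length - 1) (by omega)]
  rw [show sd dice 0 = pySortInt (dice.getD 0 []) from rfl,
    show sd dice (dice.length - 1) = pySortInt (dice.getD (dice.length - 1) []) from rfl]
  rw [beatsGo_sorted]
  rfl

theorem main_eq (dice : List (List Int)) (h : dice ≠ []) :
    intransitive dice = intransitive_alt dice :=
  (A_eq dice h).trans (B_eq dice h).symm

-- ===== VERDICT (by name: the statement is the Claim_ definition above) =====
theorem intransitive_spec : Claim_equal_intransitive := by
  intro dice _ hpre
  unfold Spec_intransitive
  exact main_eq dice hpre
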